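-- pv_equiv track=rewrite | github.com/Lovsan/chatterbox | app.py | categorize_mime_type
-- ===== SOURCE A (Python) =====
-- ALLOWED_MEDIA_TYPES = {
--     "image": {
--         "image/jpeg",
--         "image/png",
--         "image/gif",
--         "image/webp",
--     },
--     "audio": {
--         "audio/mpeg",
--         "audio/ogg",
--         "audio/webm",
--         "audio/wav",
--     },
--     "video": {
--         "video/webm",
--         "video/mp4",
--         "video/ogg",
--     },
--     "file": {
--         "application/pdf",
--         "application/zip",
--         "application/x-zip-compressed",
--         "application/x-7z-compressed",
--         "application/vnd.ms-excel",
--         "application/vnd.openxmlformats-officedocument.spreadsheetml.sheet",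
--         "application/msword",
--         "application/vnd.openxmlformats-officedocument.wordprocessingml.document",
--         "application/vnd.ms-powerpoint",
--         "application/vnd.openxmlformats-officedocument.presentationml.presentation",
--         "text/plain",
--     },
-- }
--
-- def categorize_mime_type(mime_type: str) -> str | None:
--     """Return the media category for a MIME type."""
--
--     if not mime_type:
--         return None
--     normalized = mime_type.lower()
--     for category, allowed_set in ALLOWED_MEDIA_TYPES.items():
--         if normalized in allowed_set or normalized.startswith(f"{category}/"):
--             return category
--     return None
-- ===== SOURCE B (Python) =====
-- FILE_MIME_TYPES = frozenset({
--     "application/pdf",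
--     "application/zip",
--     "application/x-zip-compressed",
--     "application/x-7z-compressed",
--     "application/vnd.ms-excel",
--     "application/vnd.openxmlformats-officedocument.spreadsheetml.sheet",
--     "application/msword",
--     "application/vnd.openxmlformats-officedocument.wordprocessingml.document",
--     "application/vnd.ms-powerpoint",
--     "application/vnd.openxmlformats-officedocument.presentationml.presentation",
--     "text/plain",
-- })
--
-- def categorize_mime_type(mime_type: str) -> str | None:
--     """Return the media category for a MIME type."""
--     normalized = mime_type.lower()
--     top, sep, _ = normalized.partition("/")
--     if sep and top in ("image", "audio", "video", "file"):
--         return top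
--     return "file" if normalized in FILE_MIME_TYPES else None
-- ===== Notes on version B (the rewrite author's own statement) =====
-- stated objective: alternative
-- what changed: B splits the MIME string once at the first slash and classifies by its top-level type (image, audio, video, file directly, otherwise one membership test in the file set), instead of A's scan over all four categories doing a set-membership OR prefix test per category.
import Mathlib
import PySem

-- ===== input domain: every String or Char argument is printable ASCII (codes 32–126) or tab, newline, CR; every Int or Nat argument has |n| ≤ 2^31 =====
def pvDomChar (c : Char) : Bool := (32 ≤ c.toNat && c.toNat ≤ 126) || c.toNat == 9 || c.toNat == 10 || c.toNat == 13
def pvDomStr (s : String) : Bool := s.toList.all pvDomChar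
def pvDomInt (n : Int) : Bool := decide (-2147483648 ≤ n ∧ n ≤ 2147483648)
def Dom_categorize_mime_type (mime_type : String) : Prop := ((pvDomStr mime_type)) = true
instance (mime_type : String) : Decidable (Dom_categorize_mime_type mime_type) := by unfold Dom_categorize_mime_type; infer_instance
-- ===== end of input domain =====

-- B parses the string once with partition('/') and classifies by its top-level type instead of
-- A's per-category (set-membership OR prefix) scan; return values are identical on all strings.

-- ===== PORT A =====
-- the module-level ALLOWED_MEDIA_TYPES dict, category → set of MIME strings
def pvAllowedMediaTypes : PySem.Dict String (PySem.Set String) :=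
  PySem.Dict.ofList
    [ ("image", PySem.Set.ofList ["image/jpeg", "image/png", "image/gif", "image/webp"]),
      ("audio", PySem.Set.ofList ["audio/mpeg", "audio/ogg", "audio/webm", "audio/wav"]),
      ("video", PySem.Set.ofList ["video/webm", "video/mp4", "video/ogg"]),
      ("file", PySem.Set.ofList
        ["application/pdf", "application/zip", "application/x-zip-compressed",
         "application/x-7z-compressed", "application/vnd.ms-excel",
         "application/vnd.openxmlformats-officedocument.spreadsheetml.sheet",
         "application/msword",
         "application/vnd.openxmlformats-officedocument.wordprocessingml.document",
         "application/vnd.ms-powerpoint",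
         "application/vnd.openxmlformats-officedocument.presentationml.presentation",
         "text/plain"]) ]

-- the 'for category, allowed_set in …items():' loop with its early return
def pvCatLoop (normalized : String) : List (String × PySem.Set String) → Option String
  | [] => none
  | (category, allowed) :: rest =>
      if PySem.Set.contains allowed normalized
          || PySem.Str.startswith normalized (String.ofList (category.toList ++ ['/'])) then
        some category
      else pvCatLoop normalized rest

def categorize_mime_type (mime_type : String) : Option String :=
  if mime_type == "" then none
  else
    let normalized := PySem.Str.lower mime_type
    pvCatLoop normalized pvAllowedMediaTypes.items

-- ===== PORT B =====
-- the module-level frozenset FILE_MIME_TYPES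
def pvFileMimeTypes : PySem.Set String :=
  PySem.Set.ofList
    ["application/pdf", "application/zip", "application/x-zip-compressed",
     "application/x-7z-compressed", "application/vnd.ms-excel",
     "application/vnd.openxmlformats-officedocument.spreadsheetml.sheet",
     "application/msword",
     "application/vnd.openxmlformats-officedocument.wordprocessingml.document",
     "application/vnd.ms-powerpoint",
     "application/vnd.openxmlformats-officedocument.presentationml.presentation",
     "text/plain"]

-- hand port of «top, sep, _ = normalized.partition(sep_char)» with the slash separator restricted to what B uses:
-- some (chars before the first '/') when '/' occurs (sep non-empty), none when it does not.
-- Exact: partition returns sep = "/" iff '/' occurs, and then top is everything before it.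
def pvTop : List Char → Option (List Char)
  | [] => none
  | c :: rest => if c = '/' then some [] else (pvTop rest).map (c :: ·)

def categorize_mime_type_alt (mime_type : String) : Option String :=
  let normalized := PySem.Str.lower mime_type
  match pvTop normalized.toList with
  | some top =>
      -- «if sep and top in ("image","audio","video","file"): return top»
      if top = "image".toList then some "image"
      else if top = "audio".toList then some "audio"
      else if top = "video".toList then some "video"
      else if top = "file".toList then some "file"
      else if PySem.Set.contains pvFileMimeTypes normalized then some "file" else none
  | none =>
      if PySem.Set.contains pvFileMimeTypes normalized then some "file" else none

-- ===== PRECONDITION & SPEC =====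
def Spec_categorize_mime_type (mime_type : String) (out : Option String) : Prop := out = categorize_mime_type_alt mime_type
instance (mime_type : String) (out : Option String) : Decidable (Spec_categorize_mime_type mime_type out) := by unfold Spec_categorize_mime_type; infer_instance

-- ===== CLAIM (what is proved, stated in full; the proofs are below) =====
def Claim_equal_categorize_mime_type : Prop := ∀ (mime_type : String), Dom_categorize_mime_type mime_type → Spec_categorize_mime_type mime_type (categorize_mime_type mime_type)

-- ===== LEMMAS AND PROOFS =====

-- pvTop characterises prefixes ending in '/'
theorem pvTop_prefix : ∀ (cs p : List Char), '/' ∉ p →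
    ((p ++ ['/']) <+: cs ↔ pvTop cs = some p) := by
  intro cs
  induction cs with
  | nil =>
      intro p _
      simp [pvTop]
  | cons c cs ih =>
      intro p hp
      cases p with
      | nil =>
          by_cases hc : c = '/'
          · subst hc; simp [pvTop]
          · simp [pvTop, hc, List.cons_prefix_cons, Ne.symm hc]
      | cons q p' =>
          have hq : q ≠ '/' := fun h => hp (by simp [h])
          have hp' : '/' ∉ p' := fun h => hp (by simp [h])
          by_cases hc : c = '/'
          · subst hc
            simp [pvTop, List.cons_prefix_cons]
            exact fun h' => absurd h' hq
          · simp only [pvTop, if_neg hc, List.cons_append, List.cons_prefix_cons]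
            rw [ih p' hp']
            cases hpt : pvTop cs
            · simp
            · simp
              aesop

-- startswith with a '/'-terminated prefix is exactly a pvTop hit
theorem sw_eq (n : String) (p : List Char) (hp : '/' ∉ p) :
    PySem.Str.startswith n (String.ofList (p ++ ['/'])) = (pvTop n.toList == some p) := by
  rw [Bool.eq_iff_iff]
  simp only [PySem.Str.startswith_eq, PySem.Chars.startswith_iff, beq_iff_eq]
  rw [show (String.ofList (p ++ ['/'])).toList = p ++ ['/'] by simp]
  exact pvTop_prefix n.toList p hp

-- core: on any normalized string the loop and the parse-then-classify agree
theorem pv_body_eq (n : String) :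
    pvCatLoop n pvAllowedMediaTypes.items
      = (match pvTop n.toList with
         | some top =>
             if top = "image".toList then some "image"
             else if top = "audio".toList then some "audio"
             else if top = "video".toList then some "video"
             else if top = "file".toList then some "file"
             else if PySem.Set.contains pvFileMimeTypes n then some "file" else none
         | none =>
             if PySem.Set.contains pvFileMimeTypes n then some "file" else none) := by
  by_cases h1 : n = "image/jpeg"; · subst h1; decide
  by_cases h2 : n = "image/png"; · subst h2; decide
  by_cases h3 : n = "image/gif"; · subst h3; decide
  by_cases h4 : n = "image/webp"; · subst h4; decide
  by_cases h5 : n = "audio/mpeg"; · subst h5; decide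
  by_cases h6 : n = "audio/ogg"; · subst h6; decide
  by_cases h7 : n = "audio/webm"; · subst h7; decide
  by_cases h8 : n = "audio/wav"; · subst h8; decide
  by_cases h9 : n = "video/webm"; · subst h9; decide
  by_cases h10 : n = "video/mp4"; · subst h10; decide
  by_cases h11 : n = "video/ogg"; · subst h11; decide
  by_cases h12 : n = "application/pdf"; · subst h12; decide
  by_cases h13 : n = "application/zip"; · subst h13; decide
  by_cases h14 : n = "application/x-zip-compressed"; · subst h14; decide
  by_cases h15 : n = "application/x-7z-compressed"; · subst h15; decide
  by_cases h16 : n = "application/vnd.ms-excel"; · subst h16; decide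
  by_cases h17 : n = "application/vnd.openxmlformats-officedocument.spreadsheetml.sheet"; · subst h17; decide
  by_cases h18 : n = "application/msword"; · subst h18; decide
  by_cases h19 : n = "application/vnd.openxmlformats-officedocument.wordprocessingml.document"; · subst h19; decide
  by_cases h20 : n = "application/vnd.ms-powerpoint"; · subst h20; decide
  by_cases h22 : n = "application/vnd.openxmlformats-officedocument.presentationml.presentation"; · subst h22; decide
  by_cases h23 : n = "text/plain"; · subst h23; decide
  -- n matches no explicit MIME string
  have hitems : pvAllowedMediaTypes.items =
      [ ("image", ["image/jpeg", "image/png", "image/gif", "image/webp"]),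
        ("audio", ["audio/mpeg", "audio/ogg", "audio/webm", "audio/wav"]),
        ("video", ["video/webm", "video/mp4", "video/ogg"]),
        ("file",
          ["application/pdf", "application/zip", "application/x-zip-compressed",
           "application/x-7z-compressed", "application/vnd.ms-excel",
           "application/vnd.openxmlformats-officedocument.spreadsheetml.sheet",
           "application/msword",
           "application/vnd.openxmlformats-officedocument.wordprocessingml.document",
           "application/vnd.ms-powerpoint",
           "application/vnd.openxmlformats-officedocument.presentationml.presentation",
           "text/plain"]) ] := by decide
  have c1 : PySem.Set.contains ["image/jpeg", "image/png", "image/gif", "image/webp"] n = false := by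
    simp only [PySem.Set.contains_eq_decide]; simp [h1, h2, h3, h4]
  have c2 : PySem.Set.contains ["audio/mpeg", "audio/ogg", "audio/webm", "audio/wav"] n = false := by
    simp only [PySem.Set.contains_eq_decide]; simp [h5, h6, h7, h8]
  have c3 : PySem.Set.contains ["video/webm", "video/mp4", "video/ogg"] n = false := by
    simp only [PySem.Set.contains_eq_decide]; simp [h9, h10, h11]
  have c4 : PySem.Set.contains pvFileMimeTypes n = false := by
    simp only [pvFileMimeTypes]
    simp only [PySem.Set.contains_eq_decide]
    simp [PySem.Set.mem_ofList, h12, h13, h14, h15, h16, h17, h18, h19, h20, h22, h23]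
  have hm : n ∉ pvFileMimeTypes := by
    simp [pvFileMimeTypes, PySem.Set.mem_ofList, h12, h13, h14, h15, h16, h17, h18, h19, h20, h22, h23]
  rw [hitems]
  simp only [pvCatLoop, c1, c2, c3, show PySem.Set.contains
      ["application/pdf", "application/zip", "application/x-zip-compressed",
       "application/x-7z-compressed", "application/vnd.ms-excel",
       "application/vnd.openxmlformats-officedocument.spreadsheetml.sheet",
       "application/msword",
       "application/vnd.openxmlformats-officedocument.wordprocessingml.document",
       "application/vnd.ms-powerpoint",
       "application/vnd.openxmlformats-officedocument.presentationml.presentation",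
       "text/plain"] n = false from c4, Bool.false_or]
  rw [sw_eq n "image".toList (by decide), sw_eq n "audio".toList (by decide),
      sw_eq n "video".toList (by decide), sw_eq n "file".toList (by decide)]
  cases hpt : pvTop n.toList with
  | none => simp [hm]
  | some t =>
      simp only [beq_iff_eq, Option.some.injEq, c4]
      rfl

-- ===== VERDICT (by name: the statement is the Claim_ definition above) =====
theorem categorize_mime_type_spec : Claim_equal_categorize_mime_type := by
  intro s _
  unfold Spec_categorize_mime_type categorize_mime_type categorize_mime_type_alt
  by_cases h : s == ""
  · have : s = "" := by exact eq_of_beq h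
    subst this; decide
  · simp only [h, Bool.false_eq_true, if_false]
    exact pv_body_eq (PySem.Str.lower s)
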